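-- pv_equiv track=rewrite | github.com/kevinlyu1/volvoTruckWork | functions.py | convert_identifier
-- ===== SOURCE A (Python) =====
-- def decimalToBinary(ip_val):
--     binaryString = ""
--     if ip_val >= 1:
--         binaryString += decimalToBinary(ip_val // 2)
--     binaryString += str(ip_val % 2)
--     return binaryString
--
-- def convert_identifier(ID, CH):
--     binary = ""
--     tempID = ""
--     binary += "1"
--     binaryCH = decimalToBinary(CH)
--     binaryCH = binaryCH[1:]
--     if len(binaryCH) > 4:
--         return -1
--     elif len(binaryCH) < 4:
--         binaryCH = binaryCH.zfill(4)
--     binary += binaryCH[0]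
--     binary += binaryCH[1]
--     for i in range(0,5):
--         binary += "0"
--     binaryID = decimalToBinary(int(ID))
--     binaryID = binaryID[1:]
--     if len(binaryID) > 6:
--         return -1
--     elif len(binaryID) < 6:
--         binaryID = binaryID.zfill(6)
--
--     binary += binaryID
--     binary += binaryCH[2]
--     binary += binaryCH[3]
--     tempHex = hex(int(binary,2))
--     cleanedHex = tempHex[2:]
--     tempID += "9BFF"
--     tempID += cleanedHex
--     newID = int(tempID, 16)
--
--     return newID
-- ===== SOURCE B (Python) =====
-- def convert_identifier(ID, CH):
--     # Direct bit arithmetic instead of recursive binary-string building and re-parsing.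
--     if CH > 15:
--         return -1
--     idv = int(ID)
--     if idv > 63:
--         return -1
--     ch = max(CH, 0)
--     iv = max(idv, 0)
--     b3 = (ch // 8) % 2
--     b2 = (ch // 4) % 2
--     b1 = (ch // 2) % 2
--     b0 = ch % 2
--     value = 32768 + b3 * 16384 + b2 * 8192 + iv * 4 + b1 * 2 + b0
--     return 0x9BFF0000 + value
-- ===== Notes on version B (the rewrite author's own statement) =====
-- stated objective: simpler
-- what changed: Replaces the recursive decimal-to-binary string builder, zero-filling, string concatenation and hex round-trip (bits -> str -> int -> hex str -> int) by direct integer arithmetic: extract CH's four bits and assemble the 16-bit value numerically, then add 0x9BFF0000; negative CH/ID are clamped to 0, which is exactly what A's recursion (never entered for values < 1) encodes.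
import Mathlib
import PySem

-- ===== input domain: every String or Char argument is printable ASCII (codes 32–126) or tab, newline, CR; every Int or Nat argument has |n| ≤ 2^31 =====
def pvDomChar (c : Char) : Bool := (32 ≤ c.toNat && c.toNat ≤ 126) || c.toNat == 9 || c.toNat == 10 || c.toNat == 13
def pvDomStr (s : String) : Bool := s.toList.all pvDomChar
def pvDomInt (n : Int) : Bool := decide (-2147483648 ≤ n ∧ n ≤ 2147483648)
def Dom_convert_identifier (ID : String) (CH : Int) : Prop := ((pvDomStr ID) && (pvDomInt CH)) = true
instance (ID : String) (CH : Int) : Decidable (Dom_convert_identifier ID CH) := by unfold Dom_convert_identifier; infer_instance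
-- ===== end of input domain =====

-- B replaces A's recursive binary-string building, zero-filling and hex re-parsing by direct
-- integer bit arithmetic (objective: simpler).

-- ===== PORT A =====
-- Strings are ported as List Char (PySem.Chars is exact there).  The recursion of
-- decimalToBinary is on ip_val // 2 and stops once ip_val < 1; a structural fuel of
-- ip_val.toNat bounds its depth (the fuel-0 case is the same no-recursion branch, reached
-- exactly when ip_val < 1), so the fuel wrapper computes exactly what the Python recursion does.
def decimalToBinaryFuel : Nat → Int → List Char
  | 0, ip_val => [] ++ PySem.Int.toChars (PySem.Int.mod ip_val 2)
  | f+1, ip_val =>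
    (if ip_val ≥ 1 then decimalToBinaryFuel f (PySem.Int.floordiv ip_val 2) else [])
      ++ PySem.Int.toChars (PySem.Int.mod ip_val 2)

def decimalToBinary (ip_val : Int) : List Char := decimalToBinaryFuel ip_val.toNat ip_val

-- hex(n) for n ≥ 0 (the only case A reaches): "0x" ++ lowercase hex digits; same fuel scheme
def pvHexDigit (d : Int) : Char :=
  if d < 10 then Char.ofNat ('0'.toNat + d.toNat) else Char.ofNat ('a'.toNat + (d - 10).toNat)

def pvHexDigitsFuel : Nat → Int → List Char
  | 0, n => [pvHexDigit (PySem.Int.mod n 16)]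
  | f+1, n =>
    if n ≥ 16 then pvHexDigitsFuel f (PySem.Int.floordiv n 16) ++ [pvHexDigit (PySem.Int.mod n 16)]
    else [pvHexDigit (PySem.Int.mod n 16)]

def pvHexDigits (n : Int) : List Char := pvHexDigitsFuel n.toNat n

def convert_identifier (ID : String) (CH : Int) : Int :=
  let binary : List Char := []
  let binary := binary ++ ['1']
  let binaryCH := decimalToBinary CH
  let binaryCH := PySem.List.slice binaryCH (some 1) none
  if binaryCH.length > 4 then -1
  else
    let binaryCH := if binaryCH.length < 4 then PySem.Chars.zfill binaryCH 4 else binaryCH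
    let binary := binary ++ [(PySem.List.pyGet? binaryCH 0).getD ' ']   -- in range: length = 4 here
    let binary := binary ++ [(PySem.List.pyGet? binaryCH 1).getD ' ']
    let binary := (PySem.List.pyRange 0 5 1).foldl (fun b _ => b ++ ['0']) binary
    match PySem.Int.ofStr? ID with                                      -- int(ID); none = ValueError, excluded by Pre_
    | none => 0
    | some idv =>
      let binaryID := decimalToBinary idv
      let binaryID := PySem.List.slice binaryID (some 1) none
      if binaryID.length > 6 then -1
      else
        let binaryID := if binaryID.length < 6 then PySem.Chars.zfill binaryID 6 else binaryID
        let binary := binary ++ binaryID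
        let binary := binary ++ [(PySem.List.pyGet? binaryCH 2).getD ' ']
        let binary := binary ++ [(PySem.List.pyGet? binaryCH 3).getD ' ']
        let tempHex := ['0', 'x'] ++ pvHexDigits ((PySem.Int.ofCharsBase? binary 2).getD 0)  -- binary is a bit string: always parses
        let cleanedHex := PySem.List.slice tempHex (some 2) none
        let tempID := ['9', 'B', 'F', 'F'] ++ cleanedHex
        (PySem.Int.ofCharsBase? tempID 16).getD 0                       -- valid hex digits: always parses

-- ===== PORT B =====
def convert_identifier_alt (ID : String) (CH : Int) : Int :=
  if CH > 15 then -1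
  else
    match PySem.Int.ofStr? ID with                                      -- int(ID); none = ValueError, excluded by Pre_
    | none => 0
    | some idv =>
      if idv > 63 then -1
      else
        let ch := max CH 0
        let iv := max idv 0
        let b3 := PySem.Int.mod (PySem.Int.floordiv ch 8) 2
        let b2 := PySem.Int.mod (PySem.Int.floordiv ch 4) 2
        let b1 := PySem.Int.mod (PySem.Int.floordiv ch 2) 2
        let b0 := PySem.Int.mod ch 2
        let value := 32768 + b3 * 16384 + b2 * 8192 + iv * 4 + b1 * 2 + b0
        0x9BFF0000 + value

-- ===== PRECONDITION & SPEC =====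
-- Pre_ excludes exactly the inputs where A raises ValueError: ID not parseable as an int while
-- CH ≤ 15 (for CH > 15 A returns -1 before ever touching ID).
def Pre_convert_identifier (ID : String) (CH : Int) : Prop :=
  (PySem.Int.ofStr? ID).isSome = true ∨ CH > 15
instance (ID : String) (CH : Int) : Decidable (Pre_convert_identifier ID CH) := by
  unfold Pre_convert_identifier; infer_instance

def pvWitness_convert_identifier : String × Int := ("7", 3)

def Spec_convert_identifier (ID : String) (CH : Int) (out : Int) : Prop := out = convert_identifier_alt ID CH
instance (ID : String) (CH : Int) (out : Int) : Decidable (Spec_convert_identifier ID CH out) := by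
  unfold Spec_convert_identifier; infer_instance

-- ===== CLAIM (what is proved, stated in full; the proofs are below) =====
def Claim_equal_convert_identifier : Prop := ∀ (ID : String) (CH : Int), Dom_convert_identifier ID CH → Pre_convert_identifier ID CH → Spec_convert_identifier ID CH (convert_identifier ID CH)

-- ===== LEMMAS AND PROOFS =====

-- n's sliced bit string:  decimalToBinary(n)[1:]
def pvRaw (n : Int) : List Char := PySem.List.slice (decimalToBinary n) (some 1) none

-- the zero-filled binaryCH
def pvBCH (CH : Int) : List Char :=
  if (pvRaw CH).length < 4 then PySem.Chars.zfill (pvRaw CH) 4 else pvRaw CH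

-- the tail of A after the CH length check passed and int(ID) succeeded (same term as the port)
def pvTailA (binaryCH : List Char) (idv : Int) : Int :=
  let binary := ([] : List Char) ++ ['1']
  let binary := binary ++ [(PySem.List.pyGet? binaryCH 0).getD ' ']
  let binary := binary ++ [(PySem.List.pyGet? binaryCH 1).getD ' ']
  let binary := (PySem.List.pyRange 0 5 1).foldl (fun b _ => b ++ ['0']) binary
  let binaryID := decimalToBinary idv
  let binaryID := PySem.List.slice binaryID (some 1) none
  if binaryID.length > 6 then -1
  else
    let binaryID := if binaryID.length < 6 then PySem.Chars.zfill binaryID 6 else binaryID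
    let binary := binary ++ binaryID
    let binary := binary ++ [(PySem.List.pyGet? binaryCH 2).getD ' ']
    let binary := binary ++ [(PySem.List.pyGet? binaryCH 3).getD ' ']
    let tempHex := ['0', 'x'] ++ pvHexDigits ((PySem.Int.ofCharsBase? binary 2).getD 0)
    let cleanedHex := PySem.List.slice tempHex (some 2) none
    let tempID := ['9', 'B', 'F', 'F'] ++ cleanedHex
    (PySem.Int.ofCharsBase? tempID 16).getD 0

-- B's arithmetic tail as a function of the clamped ch and iv
def pvValB (ch iv : Int) : Int :=
  2617180160 + (32768 + PySem.Int.mod (PySem.Int.floordiv ch 8) 2 * 16384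
    + PySem.Int.mod (PySem.Int.floordiv ch 4) 2 * 8192 + iv * 4
    + PySem.Int.mod (PySem.Int.floordiv ch 2) 2 * 2 + PySem.Int.mod ch 2)

theorem pv_toChars_mod_two_len (n : Int) : (PySem.Int.toChars (PySem.Int.mod n 2)).length = 1 := by
  rcases PySem.Int.mod_two_eq n with h | h <;> rw [h] <;> decide

theorem pv_d2bFuel_len : ∀ (f : Nat) (m : Nat), m ≤ f →
    (decimalToBinaryFuel f (m : Int)).length = PySem.Int.bitLength (m : Int) + 1 := by
  intro f
  induction f with
  | zero =>
    intro m hm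
    have hm0 : m = 0 := by omega
    subst hm0
    decide
  | succ f ih =>
    intro m hm
    by_cases h1 : (m : Int) ≥ 1
    · have hm1 : 1 ≤ m := by exact_mod_cast h1
      rw [decimalToBinaryFuel, if_pos h1, List.length_append, pv_toChars_mod_two_len]
      have hfd : PySem.Int.floordiv (m : Int) 2 = ((m / 2 : Nat) : Int) := by
        exact_mod_cast PySem.Int.floordiv_natCast m 2
      rw [hfd, ih (m / 2) (by omega), PySem.Int.bitLength_natCast hm1]
    · have hm0 : m = 0 := by omega
      subst hm0
      simp only [decimalToBinaryFuel, Nat.cast_zero, PySem.Int.bitLength_zero]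
      rw [if_neg (show ¬ (0:Int) ≥ 1 by norm_num)]
      decide

theorem pv_d2b_len (m : Nat) :
    (decimalToBinary (m : Int)).length = PySem.Int.bitLength (m : Int) + 1 := by
  rw [decimalToBinary, Int.toNat_natCast]
  exact pv_d2bFuel_len m m le_rfl

theorem pv_raw_len (n : Int) (h : 0 ≤ n) : (pvRaw n).length = PySem.Int.bitLength n := by
  obtain ⟨m, rfl⟩ : ∃ m : Nat, n = (m : Int) := ⟨n.toNat, by omega⟩
  rw [pvRaw, PySem.List.slice_from _ (by norm_num : (0:Int) ≤ 1), List.length_drop, pv_d2b_len]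
  simp

theorem pv_raw_neg (n : Int) (h : n < 0) : pvRaw n = [] := by
  have ht : n.toNat = 0 := by omega
  rw [pvRaw, decimalToBinary, ht]
  rcases PySem.Int.mod_two_eq n with h2 | h2 <;>
    · simp only [decimalToBinaryFuel, h2]
      decide

theorem pv_bl_ge (n : Int) (k : Nat) (h : (2 : Int) ^ k ≤ n) : k + 1 ≤ PySem.Int.bitLength n := by
  by_contra hc
  have hn0 : 0 ≤ n := le_trans (by positivity) h
  have h1 : (2 : Nat) ^ k ≤ n.natAbs := by
    have : ((2 : Nat) ^ k : Int) ≤ (n.natAbs : Int) := by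
      rw [Int.natAbs_of_nonneg hn0]; push_cast; exact h
    exact_mod_cast this
  have h2 := PySem.Int.lt_two_pow_bitLength n
  have h3 : (2 : Nat) ^ PySem.Int.bitLength n ≤ 2 ^ k :=
    Nat.pow_le_pow_right (by norm_num) (by omega)
  omega

theorem pv_bl_le (n : Int) (k : Nat) (h0 : 0 ≤ n) (h : n < (2 : Int) ^ k) :
    PySem.Int.bitLength n ≤ k := by
  by_contra hc
  have hne : n ≠ 0 := by
    intro h'; subst h'; simp [PySem.Int.bitLength_zero] at hc
  have hle := PySem.Int.two_pow_bitLength_le n hne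
  have h2 : (2 : Nat) ^ k ≤ 2 ^ (PySem.Int.bitLength n - 1) :=
    Nat.pow_le_pow_right (by norm_num) (by omega)
  have h4 : n.natAbs < (2 : Nat) ^ k := by
    have : (n.natAbs : Int) < ((2 : Nat) ^ k : Int) := by
      rw [Int.natAbs_of_nonneg h0]; push_cast; exact h
    exact_mod_cast this
  omega

theorem pv_A_minus1 (ID : String) (CH : Int) (hlen : (pvRaw CH).length > 4) :
    convert_identifier ID CH = -1 := by
  have hlen' : (PySem.List.slice (decimalToBinary CH) (some 1)).length > 4 := hlen
  simp only [convert_identifier]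
  rw [if_pos hlen']

theorem pv_A_eq (ID : String) (CH : Int) (idv : Int) (hid : PySem.Int.ofStr? ID = some idv)
    (hlen : ¬ (pvRaw CH).length > 4) :
    convert_identifier ID CH = pvTailA (pvBCH CH) idv := by
  have hlen' : ¬ (PySem.List.slice (decimalToBinary CH) (some 1)).length > 4 := hlen
  simp only [convert_identifier, pvTailA, pvBCH, pvRaw]
  rw [if_neg hlen']
  simp only [hid]

theorem pv_B_eq (ID : String) (CH : Int) (idv : Int) (hid : PySem.Int.ofStr? ID = some idv)
    (h16 : ¬ CH > 15) (h64 : ¬ idv > 63) :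
    convert_identifier_alt ID CH = pvValB (max CH 0) (max idv 0) := by
  simp only [convert_identifier_alt, pvValB]
  rw [if_neg h16]
  simp only [hid]
  rw [if_neg h64]

theorem pv_B_minus1 (ID : String) (CH : Int) (idv : Int) (hid : PySem.Int.ofStr? ID = some idv)
    (h16 : ¬ CH > 15) (h64 : idv > 63) :
    convert_identifier_alt ID CH = -1 := by
  simp only [convert_identifier_alt]
  rw [if_neg h16]
  simp [hid, h64]

theorem pv_tailA_minus1 (bch : List Char) (idv : Int) (hlen : (pvRaw idv).length > 6) :
    pvTailA bch idv = -1 := by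
  have hlen' : (PySem.List.slice (decimalToBinary idv) (some 1)).length > 6 := hlen
  simp only [pvTailA]
  rw [if_pos hlen']

theorem pv_tailA_neg (bch : List Char) (idv : Int) (h : idv < 0) :
    pvTailA bch idv = pvTailA bch 0 := by
  have h1 : PySem.List.slice (decimalToBinary idv) (some 1) = [] := pv_raw_neg idv h
  simp only [pvTailA]
  rw [h1, show PySem.List.slice (decimalToBinary 0) (some 1) = ([] : List Char) from by decide]

theorem pv_BCH_neg (CH : Int) (h : CH < 0) : pvBCH CH = pvBCH 0 := by
  simp only [pvBCH]
  rw [pv_raw_neg CH h, show pvRaw 0 = ([] : List Char) from by decide]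

theorem pv_enum : ∀ c : Nat, c < 16 → ∀ i : Nat, i < 64 →
    pvTailA (pvBCH (c : Int)) (i : Int) = pvValB (c : Int) (i : Int) := by
  decide

theorem pv_main (CH idv : Int) (h16 : ¬ CH > 15) (h64 : ¬ idv > 63) :
    pvTailA (pvBCH CH) idv = pvValB (max CH 0) (max idv 0) := by
  have hch : pvBCH CH = pvBCH (max CH 0) := by
    rcases lt_or_ge CH 0 with h | h
    · rw [pv_BCH_neg CH h, show max CH 0 = 0 from max_eq_right (by omega)]
    · rw [show max CH 0 = CH from max_eq_left h]
  have hiv : pvTailA (pvBCH (max CH 0)) idv = pvTailA (pvBCH (max CH 0)) (max idv 0) := by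
    rcases lt_or_ge idv 0 with h | h
    · rw [pv_tailA_neg _ idv h, show max idv 0 = 0 from max_eq_right (by omega)]
    · rw [show max idv 0 = idv from max_eq_left h]
  rw [hch, hiv]
  obtain ⟨c, hc⟩ : ∃ c : Nat, max CH 0 = (c : Int) := ⟨(max CH 0).toNat, by omega⟩
  obtain ⟨i, hi⟩ : ∃ i : Nat, max idv 0 = (i : Int) := ⟨(max idv 0).toNat, by omega⟩
  rw [hc, hi]
  exact pv_enum c (by omega) i (by omega)

-- ===== VERDICT (by name: the statement is the Claim_ definition above) =====
theorem convert_identifier_spec : Claim_equal_convert_identifier := by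
  intro ID CH _ hPre
  unfold Spec_convert_identifier
  by_cases h16 : CH > 15
  · have hbl : 4 + 1 ≤ PySem.Int.bitLength CH := pv_bl_ge CH 4 (by norm_num; omega)
    rw [pv_A_minus1 ID CH (by rw [pv_raw_len CH (by omega)]; omega)]
    simp only [convert_identifier_alt]
    rw [if_pos h16]
  · rcases hPre with hPre | h15
    swap
    · omega
    obtain ⟨idv, hid⟩ : ∃ idv, PySem.Int.ofStr? ID = some idv := by
      cases h : PySem.Int.ofStr? ID with
      | none => rw [h] at hPre; simp at hPre
      | some v => exact ⟨v, rfl⟩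
    have hlen4 : ¬ (pvRaw CH).length > 4 := by
      rcases lt_or_ge CH 0 with h | h
      · rw [pv_raw_neg CH h]; simp
      · rw [pv_raw_len CH h]
        have := pv_bl_le CH 4 h (by norm_num; omega)
        omega
    rw [pv_A_eq ID CH idv hid hlen4]
    by_cases h64 : idv > 63
    · have hbl : 6 + 1 ≤ PySem.Int.bitLength idv := pv_bl_ge idv 6 (by norm_num; omega)
      rw [pv_tailA_minus1 _ idv (by rw [pv_raw_len idv (by omega)]; omega)]
      rw [pv_B_minus1 ID CH idv hid h16 h64]
    · rw [pv_B_eq ID CH idv hid h16 h64, pv_main CH idv h16 h64]
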